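-- pv_equiv track=rewrite | github.com/crayzy99/RelationExtraction | nlp_util.py | get_occur_positions
-- ===== SOURCE A (Python) =====
-- def get_occur_positions(word, text, return_on_hit=False):
--     assert(isinstance(word, str) and isinstance(text, str))
--     if not word or not text:
--         return []
--     occur_pos = []
--     ptr = 0
--     while ptr < len(text):
--         p = text.find(word, ptr)
--         if p < 0:
--             break
--         if (p - 1 >= 0 and text[p - 1].isalpha()) \
--                 or (p + len(word) < len(text) and text[p + len(word)].isalpha()):
--             ptr = p + len(word)
--             continue
--         occur_pos.append(p)
--         if return_on_hit:
--             return occur_pos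
--         ptr = p + len(word)
--     return occur_pos
-- ===== SOURCE B (Python) =====
-- def get_occur_positions(word, text, return_on_hit=False):
--     assert(isinstance(word, str) and isinstance(text, str))
--     if not word or not text:
--         return []
--     # phase 1: collect all non-overlapping occurrence starts by scanning a shrinking suffix
--     starts = []
--     base = 0
--     rest = text
--     while True:
--         i = rest.find(word)
--         if i < 0:
--             break
--         starts.append(base + i)
--         base += i + len(word)
--         rest = rest[i + len(word):]
--     # phase 2: keep starts not bordered by alphabetic characters; truncate on return_on_hit
--     n = len(word)
--     hits = [p for p in starts
--             if not ((p > 0 and text[p - 1].isalpha())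
--                     or (p + n < len(text) and text[p + n].isalpha()))]
--     return hits[:1] if return_on_hit else hits
-- ===== Notes on version B (the rewrite author's own statement) =====
-- stated objective: alternative
-- what changed: Replaces A's single fused while-loop (find with a moving pointer, inline boundary skip via continue, early return) by a two-phase pipeline: first enumerate all non-overlapping occurrence starts by repeatedly slicing off the consumed suffix, then a filter comprehension applies the boundary test and truncation hits[:1] realises return_on_hit.
import Mathlib
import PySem

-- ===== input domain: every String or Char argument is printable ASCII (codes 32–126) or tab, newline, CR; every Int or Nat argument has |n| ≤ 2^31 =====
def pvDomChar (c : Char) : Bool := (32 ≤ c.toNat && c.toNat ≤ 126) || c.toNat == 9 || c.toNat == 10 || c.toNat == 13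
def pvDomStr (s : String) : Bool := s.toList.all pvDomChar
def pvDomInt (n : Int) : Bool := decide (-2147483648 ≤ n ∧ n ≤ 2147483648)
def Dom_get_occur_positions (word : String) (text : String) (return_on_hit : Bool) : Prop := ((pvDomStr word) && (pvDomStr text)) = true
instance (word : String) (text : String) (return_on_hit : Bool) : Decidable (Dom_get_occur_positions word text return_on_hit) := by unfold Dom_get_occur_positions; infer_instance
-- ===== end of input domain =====

-- B replaces A's fused find/pointer loop (inline boundary skip, early return) by a two-phase
-- pipeline — enumerate all non-overlapping match starts over a shrinking suffix, then filter +
-- truncate; objective: alternative decomposition, same cost.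


-- ===== PORT A =====
-- A's while loop: ptr scans text with str.find(word, ptr); fuel = text.length bounds the
-- iterations (ptr strictly increases each round, so the fuel is never exhausted early).
def pvALoop (w t : List Char) (roh : Bool) : Nat → Nat → List Int → List Int
  | 0, _, acc => acc
  | fuel+1, ptr, acc =>
    if ptr < t.length then
      let p := PySem.Chars.findFrom t w (ptr : Int) none
      if p < 0 then acc
      else if (decide (0 ≤ p - 1) && PySem.Chars.isalpha (PySem.List.pyGetD t (p - 1) ' '))
           || (decide (p + (w.length : Int) < (t.length : Int)) && PySem.Chars.isalpha (PySem.List.pyGetD t (p + (w.length : Int)) ' ')) then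
        pvALoop w t roh fuel (p.toNat + w.length) acc
      else
        let acc' := acc ++ [p]
        if roh then acc' else pvALoop w t roh fuel (p.toNat + w.length) acc'
    else acc

def get_occur_positions (word : String) (text : String) (return_on_hit : Bool) : List Int :=
  let w := word.toList
  let t := text.toList
  if w.isEmpty || t.isEmpty then [] else pvALoop w t return_on_hit t.length 0 []

-- ===== PORT B =====
-- B's boundary test: position p is rejected when a letter borders the occurrence.
def pvBad (w t : List Char) (p : Int) : Bool :=
  (decide (0 < p) && PySem.Chars.isalpha (PySem.List.pyGetD t (p - 1) ' '))
  || (decide (p + (w.length : Int) < (t.length : Int)) && PySem.Chars.isalpha (PySem.List.pyGetD t (p + (w.length : Int)) ' '))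

-- B's phase 1: all non-overlapping occurrence starts, scanning a shrinking suffix `rest`;
-- fuel = text.length bounds the iterations (rest loses ≥ 1 char per match found).
def pvStarts (w : List Char) : Nat → List Char → Nat → List Int
  | 0, _, _ => []
  | fuel+1, rest, base =>
    let i := PySem.Chars.find rest w
    if i < 0 then []
    else ((base : Int) + i) :: pvStarts w fuel (rest.drop (i.toNat + w.length)) (base + i.toNat + w.length)

def get_occur_positions_alt (word : String) (text : String) (return_on_hit : Bool) : List Int :=
  let w := word.toList
  let t := text.toList
  if w.isEmpty || t.isEmpty then []
  else
    let starts := pvStarts w t.length t 0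
    let hits := starts.filter (fun p => !pvBad w t p)
    if return_on_hit then hits.take 1 else hits

-- ===== PRECONDITION & SPEC =====
def Spec_get_occur_positions (word : String) (text : String) (return_on_hit : Bool) (out : List Int) : Prop := out = get_occur_positions_alt word text return_on_hit
instance (word : String) (text : String) (return_on_hit : Bool) (out : List Int) : Decidable (Spec_get_occur_positions word text return_on_hit out) := by unfold Spec_get_occur_positions; infer_instance

-- ===== CLAIM (what is proved, stated in full; the proofs are below) =====
def Claim_equal_get_occur_positions : Prop := ∀ (word : String) (text : String) (return_on_hit : Bool), Dom_get_occur_positions word text return_on_hit → Spec_get_occur_positions word text return_on_hit (get_occur_positions word text return_on_hit)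

-- ===== LEMMAS AND PROOFS =====

-- A's `p - 1 >= 0` and B's `p > 0` agree.
theorem pvGe_eq_gt (p : Int) : decide (0 ≤ p - 1) = decide (0 < p) := by
  simp only [decide_eq_decide]; omega

-- Loop correspondence: A's fused loop from pointer ptr equals acc ++ (filter+truncate applied
-- to B's match list for the suffix t.drop ptr, positions shifted by ptr), with matched fuel.
theorem pvKey (fuel : Nat) (w t : List Char) (roh : Bool) (hw : w ≠ []) :
    ∀ (ptr : Nat) (acc : List Int),
    pvALoop w t roh fuel ptr acc =
      acc ++ (if roh then ((pvStarts w fuel (t.drop ptr) ptr).filter (fun p => !pvBad w t p)).take 1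
              else (pvStarts w fuel (t.drop ptr) ptr).filter (fun p => !pvBad w t p)) := by
  induction fuel with
  | zero => intro ptr acc; simp [pvALoop, pvStarts]
  | succ fuel ih =>
    intro ptr acc
    by_cases hptr : ptr < t.length
    · rw [pvALoop]
      simp only [hptr, if_true]
      rw [PySem.Chars.findFrom_natCast t w ptr (le_of_lt hptr)]
      by_cases hfind : PySem.Chars.find (t.drop ptr) w = -1
      · simp only [hfind, if_true]
        rw [pvStarts]
        simp [hfind]
      · have hnn : 0 ≤ PySem.Chars.find (t.drop ptr) w := by
          have := PySem.Chars.neg_one_le_find (t.drop ptr) w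
          omega
        set i := PySem.Chars.find (t.drop ptr) w with hi
        have hp : ¬ ((if i = -1 then -1 else (ptr : Int) + i) < 0) := by
          simp only [hfind, if_false]; omega
        have hnotlt : ¬ ((ptr : Int) + i < 0) := by omega
        simp only [hfind, if_false]
        rw [if_neg hnotlt]
        rw [pvStarts]
        simp only [← hi, show ¬ (i < 0) by omega, if_false]
        have htn : ((ptr : Int) + i).toNat = ptr + i.toNat := by omega
        have hdd : (t.drop ptr).drop (i.toNat + w.length) = t.drop (ptr + i.toNat + w.length) := by
          rw [List.drop_drop]; ring_nf
        have hcond : ((decide (0 ≤ (ptr : Int) + i - 1) && PySem.Chars.isalpha (PySem.List.pyGetD t ((ptr : Int) + i - 1) ' '))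
           || (decide ((ptr : Int) + i + (w.length : Int) < (t.length : Int)) && PySem.Chars.isalpha (PySem.List.pyGetD t ((ptr : Int) + i + (w.length : Int)) ' ')))
            = pvBad w t ((ptr : Int) + i) := by
          rw [pvBad, pvGe_eq_gt]
        by_cases hbad : pvBad w t ((ptr : Int) + i) = true
        · simp only [hcond, hbad, if_true]
          rw [ih]
          simp only [List.filter_cons, hbad, Bool.not_true, htn, hdd]
          have harith : ptr + i.toNat + w.length = ptr + (i.toNat + w.length) := by omega
          simp [harith]
        · simp only [hcond, hbad]
          have hbad' : (!pvBad w t ((ptr : Int) + i)) = true := by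
            simp at hbad; simp [hbad]
          cases roh with
          | true =>
            simp only [if_true, List.filter_cons, hbad', List.take]
            simp
          | false =>
            simp only [if_false, Bool.false_eq_true]
            rw [ih]
            simp only [List.filter_cons, hbad', htn, hdd, List.append_assoc,
              List.singleton_append]
            have harith : ptr + i.toNat + w.length = ptr + (i.toNat + w.length) := by omega
            simp [harith]
    · rw [pvALoop]
      simp only [hptr, if_false]
      have hdrop : t.drop ptr = [] := List.drop_of_length_le (by omega)
      have hfind : PySem.Chars.find (t.drop ptr) w = -1 := by
        rw [hdrop, PySem.Chars.find_eq_neg_one_iff]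
        intro h
        exact hw (List.eq_nil_of_infix_nil h)
      rw [pvStarts]
      simp [hfind]

-- ===== VERDICT (by name: the statement is the Claim_ definition above) =====
theorem get_occur_positions_spec : Claim_equal_get_occur_positions := by
  intro word text roh _
  unfold Spec_get_occur_positions get_occur_positions get_occur_positions_alt
  by_cases h : word.toList.isEmpty || text.toList.isEmpty
  · simp [h]
  · simp only [h, if_false, Bool.false_eq_true]
    have hw : word.toList ≠ [] := by
      simp only [Bool.or_eq_true, List.isEmpty_iff] at h
      exact fun hn => h (Or.inl hn)
    rw [pvKey text.toList.length word.toList text.toList roh hw 0 []]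
    simp
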